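-- pv_equiv track=rewrite | github.com/Eren-Akdag/SecHeadChecker | utils/hsts_checker.py | check_hsts
-- ===== SOURCE A (Python) =====
-- def check_hsts(header_value):
--     hsts_recommendations = {
--         "max-age": 31536000,
--         "includeSubDomains": True,
--         "preload": True
--     }
--
--     directives = {}
--     for item in header_value.split(';'):
--         item = item.strip()
--         if '=' in item:
--             key, value = item.split('=', 1)
--             directives[key.lower()] = value.strip()
--         else:
--             directives[item.lower()] = True
--
--     results = {}
--     max_age = directives.get("max-age")
--     if max_age:
--         try:
--             results["max-age"] = int(max_age) >= hsts_recommendations["max-age"]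
--         except ValueError:
--             results["max-age"] = False
--     else:
--         results["max-age"] = False
--
--     results["includeSubDomains"] = directives.get("includesubdomains", False) is not False
--     results["preload"] = directives.get("preload", False) is not False
--
--     return results
-- ===== SOURCE B (Python) =====
-- def check_hsts(header_value):
--     max_age_ok = False
--     include_sub = False
--     preload = False
--     for item in header_value.split(';'):
--         item = item.strip()
--         if '=' in item:
--             key, value = item.split('=', 1)
--             key = key.lower()
--             if key == "max-age":
--                 try:
--                     max_age_ok = int(value.strip()) >= 31536000
--                 except ValueError:
--                     max_age_ok = False
--             elif key == "includesubdomains":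
--                 include_sub = True
--             elif key == "preload":
--                 preload = True
--         else:
--             key = item.lower()
--             if key == "max-age":
--                 max_age_ok = False
--             elif key == "includesubdomains":
--                 include_sub = True
--             elif key == "preload":
--                 preload = True
--     return {"max-age": max_age_ok, "includeSubDomains": include_sub, "preload": preload}
-- ===== Notes on version B (the rewrite author's own statement) =====
-- stated objective: alternative
-- what changed: B drops A's intermediate directives dict entirely and computes the three result booleans in a single pass over the split items (max-age verdict overwritten per occurrence, presence flags set sticky), instead of A's two-phase build-dict-then-query.
import Mathlib
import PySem

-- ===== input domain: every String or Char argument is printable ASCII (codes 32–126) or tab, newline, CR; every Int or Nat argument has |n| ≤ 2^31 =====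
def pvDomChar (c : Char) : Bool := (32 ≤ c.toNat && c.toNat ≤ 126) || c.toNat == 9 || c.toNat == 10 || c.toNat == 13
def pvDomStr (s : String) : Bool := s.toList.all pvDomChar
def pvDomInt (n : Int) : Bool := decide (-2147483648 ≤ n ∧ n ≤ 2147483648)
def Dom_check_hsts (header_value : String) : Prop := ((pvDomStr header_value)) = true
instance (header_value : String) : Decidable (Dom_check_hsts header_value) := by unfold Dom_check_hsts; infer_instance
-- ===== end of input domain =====

-- B replaces A's intermediate directives dict by a single pass keeping three booleans (alternative decomposition, same cost).


-- ===== PORT A =====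
-- directive values are either a string (from 'key=value') or Python's True (bare directive):
-- modelled as Option String, 'none' = True.
def hstsStepA (d : PySem.Dict String (Option String)) (item0 : String) :
    PySem.Dict String (Option String) :=
  let item := PySem.Str.strip item0
  if PySem.Str.isIn "=" item then
    match (PySem.Str.splitMax? item "=" 1).getD [] with
    | [key, value] => d.insert (PySem.Str.lower key) (some (PySem.Str.strip value))
    | _ => d  -- unreachable: '=' in item gives exactly two parts
  else
    d.insert (PySem.Str.lower item) none

-- A's max-age verdict from the dict lookup (the if max_age / try int / except block)
def hstsMaxRes : Option (Option String) → Bool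
  | none => false                 -- absent: results["max-age"] = False
  | some none => false            -- value is True (truthy): int(True) = 1 < 31536000
  | some (some s) =>
      if s == "" then false       -- empty string is falsy
      else match PySem.Int.ofStr? s with
           | some n => decide (31536000 ≤ n)
           | none => false        -- ValueError

def hstsResultsA (d : PySem.Dict String (Option String)) : List (String × Bool) :=
  [("max-age", hstsMaxRes (d.get? "max-age")),
   ("includeSubDomains", (d.get? "includesubdomains").isSome),  -- .get(..., False) is not False
   ("preload", (d.get? "preload").isSome)]

def check_hsts (header_value : String) : List (String × Bool) :=
  hstsResultsA (((PySem.Str.split? header_value ";").getD []).foldl hstsStepA PySem.Dict.empty)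

-- ===== PORT B =====
def hstsMaxAgeOk (v : String) : Bool :=
  match PySem.Int.ofStr? (PySem.Str.strip v) with
  | some n => decide (31536000 ≤ n)
  | none => false

def hstsStepB (st : Bool × Bool × Bool) (item0 : String) : Bool × Bool × Bool :=
  let item := PySem.Str.strip item0
  if PySem.Str.isIn "=" item then
    match (PySem.Str.splitMax? item "=" 1).getD [] with
    | [key, value] =>
        let k := PySem.Str.lower key
        if k == "max-age" then (hstsMaxAgeOk value, st.2.1, st.2.2)
        else if k == "includesubdomains" then (st.1, true, st.2.2)
        else if k == "preload" then (st.1, st.2.1, true)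
        else st
    | _ => st  -- unreachable: '=' in item gives exactly two parts
  else
    let k := PySem.Str.lower item
    if k == "max-age" then (false, st.2.1, st.2.2)
    else if k == "includesubdomains" then (st.1, true, st.2.2)
    else if k == "preload" then (st.1, st.2.1, true)
    else st

def hstsResultsB (st : Bool × Bool × Bool) : List (String × Bool) :=
  [("max-age", st.1), ("includeSubDomains", st.2.1), ("preload", st.2.2)]

def check_hsts_alt (header_value : String) : List (String × Bool) :=
  hstsResultsB (((PySem.Str.split? header_value ";").getD []).foldl hstsStepB (false, false, false))

-- ===== PRECONDITION & SPEC =====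
def Spec_check_hsts (header_value : String) (out : List (String × Bool)) : Prop := out = check_hsts_alt header_value
instance (header_value : String) (out : List (String × Bool)) : Decidable (Spec_check_hsts header_value out) := by unfold Spec_check_hsts; infer_instance

-- ===== CLAIM (what is proved, stated in full; the proofs are below) =====
def Claim_equal_check_hsts : Prop := ∀ (header_value : String), Dom_check_hsts header_value → Spec_check_hsts header_value (check_hsts header_value)

-- ===== LEMMAS AND PROOFS =====

def hstsAbs (d : PySem.Dict String (Option String)) : Bool × Bool × Bool :=
  (hstsMaxRes (d.get? "max-age"),
   (d.get? "includesubdomains").isSome,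
   (d.get? "preload").isSome)

lemma hstsMaxRes_strip (v : String) :
    hstsMaxRes (some (some (PySem.Str.strip v))) = hstsMaxAgeOk v := by
  simp only [hstsMaxRes, hstsMaxAgeOk]
  by_cases h : PySem.Str.strip v = ""
  · have : PySem.Int.ofStr? "" = none := by decide
    simp [h, this]
  · simp [h]

lemma hsts_step (d : PySem.Dict String (Option String)) (it : String) :
    hstsStepB (hstsAbs d) it = hstsAbs (hstsStepA d it) := by
  unfold hstsStepA hstsStepB hstsAbs
  by_cases heq : PySem.Str.isIn "=" (PySem.Str.strip it) = true
  · simp only [heq, if_true]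
    cases hp : (PySem.Str.splitMax? (PySem.Str.strip it) "=" 1).getD [] with
    | nil => rfl
    | cons key tl =>
      cases tl with
      | nil => rfl
      | cons value tl2 =>
        cases tl2 with
        | cons _ _ => rfl
        | nil =>
          by_cases h1 : PySem.Str.lower key = "max-age"
          · simp [h1, PySem.Dict.get?_insert_self,
                  PySem.Dict.get?_insert_of_ne _ _ (by decide : ("includesubdomains":String) ≠ "max-age"),
                  PySem.Dict.get?_insert_of_ne _ _ (by decide : ("preload":String) ≠ "max-age"),
                  hstsMaxRes_strip]
          · by_cases h2 : PySem.Str.lower key = "includesubdomains"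
            · simp [h2, PySem.Dict.get?_insert_self,
                    PySem.Dict.get?_insert_of_ne _ _ (by decide : ("max-age":String) ≠ "includesubdomains"),
                    PySem.Dict.get?_insert_of_ne _ _ (by decide : ("preload":String) ≠ "includesubdomains")]
            · by_cases h3 : PySem.Str.lower key = "preload"
              · simp [h3, PySem.Dict.get?_insert_self,
                      PySem.Dict.get?_insert_of_ne _ _ (by decide : ("max-age":String) ≠ "preload"),
                      PySem.Dict.get?_insert_of_ne _ _ (by decide : ("includesubdomains":String) ≠ "preload")]
              · simp [h1, h2, h3,
                      PySem.Dict.get?_insert_of_ne _ _ (Ne.symm h1),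
                      PySem.Dict.get?_insert_of_ne _ _ (Ne.symm h2),
                      PySem.Dict.get?_insert_of_ne _ _ (Ne.symm h3)]
  · simp only [heq, Bool.false_eq_true, if_false]
    by_cases h1 : PySem.Str.lower (PySem.Str.strip it) = "max-age"
    · simp [h1, PySem.Dict.get?_insert_self,
            PySem.Dict.get?_insert_of_ne _ _ (by decide : ("includesubdomains":String) ≠ "max-age"),
            PySem.Dict.get?_insert_of_ne _ _ (by decide : ("preload":String) ≠ "max-age"),
            hstsMaxRes]
    · by_cases h2 : PySem.Str.lower (PySem.Str.strip it) = "includesubdomains"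
      · simp [h2, PySem.Dict.get?_insert_self,
              PySem.Dict.get?_insert_of_ne _ _ (by decide : ("max-age":String) ≠ "includesubdomains"),
              PySem.Dict.get?_insert_of_ne _ _ (by decide : ("preload":String) ≠ "includesubdomains")]
      · by_cases h3 : PySem.Str.lower (PySem.Str.strip it) = "preload"
        · simp [h3, PySem.Dict.get?_insert_self,
                PySem.Dict.get?_insert_of_ne _ _ (by decide : ("max-age":String) ≠ "preload"),
                PySem.Dict.get?_insert_of_ne _ _ (by decide : ("includesubdomains":String) ≠ "preload")]
        · simp [h1, h2, h3,
                PySem.Dict.get?_insert_of_ne _ _ (Ne.symm h1),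
                PySem.Dict.get?_insert_of_ne _ _ (Ne.symm h2),
                PySem.Dict.get?_insert_of_ne _ _ (Ne.symm h3)]

lemma hsts_inv (items : List String) (d : PySem.Dict String (Option String)) :
    items.foldl hstsStepB (hstsAbs d) = hstsAbs (items.foldl hstsStepA d) := by
  induction items generalizing d with
  | nil => rfl
  | cons it rest ih => simp only [List.foldl_cons, hsts_step, ih]

-- ===== VERDICT (by name: the statement is the Claim_ definition above) =====
theorem check_hsts_spec : Claim_equal_check_hsts := by
  intro header_value _
  unfold Spec_check_hsts check_hsts check_hsts_alt
  have h := hsts_inv ((PySem.Str.split? header_value ";").getD []) PySem.Dict.empty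
  have h0 : hstsAbs PySem.Dict.empty = (false, false, false) := rfl
  rw [h0] at h
  rw [h]
  rfl
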